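-- pv_equiv track=rewrite | github.com/FireShade3DS/whitvm | src/whitvm/minifier.py | _build_string_map
-- ===== SOURCE A (Python) =====
-- from typing import Union, Dict, Any
--
-- def _build_string_map(lines: list) -> Dict[str, str]:
--     """Build a map of repeated strings to variable names
--
--     Only pools strings that appear more than once (saves space)
--     """
--     string_counts = {}
--
--     for line in lines:
--         # Find all strings in the line
--         i = 0
--         while i < len(line):
--             if line[i] == '#':
--                 end = line.find('#', i + 1)
--                 if end != -1:
--                     string_val = line[i:end+1]
--                     string_counts[string_val] = string_counts.get(string_val, 0) + 1
--                     i = end + 1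
--                 else:
--                     break
--             else:
--                 i += 1
--
--     # Only pool strings that appear 2+ times
--     string_map = {}
--     short_names = [chr(ord('s') + i) for i in range(26)]  # s-h
--     idx = 0
--
--     for string_val in sorted(string_counts.keys()):
--         if string_counts[string_val] >= 2 and idx < len(short_names):
--             string_map[string_val] = short_names[idx]
--             idx += 1
--
--     return string_map
-- ===== SOURCE B (Python) =====
-- def _build_string_map(lines: list) -> dict:
--     """Single-pass state machine over each line's characters; repeated
--     tokens are paired with short names via zip (avoids find/slice passes)."""
--     string_counts = {}
--     for line in lines:
--         cur = None
--         for ch in line: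
--             if cur is None:
--                 if ch == '#':
--                     cur = ch
--             else:
--                 cur += ch
--                 if ch == '#':
--                     string_counts[cur] = string_counts.get(cur, 0) + 1
--                     cur = None
--     short_names = [chr(ord('s') + i) for i in range(26)]
--     repeated = [s for s in sorted(string_counts) if string_counts[s] >= 2]
--     return dict(zip(repeated, short_names))
-- ===== Notes on version B (the rewrite author's own statement) =====
-- stated objective: faster
-- what changed: Replaces the index-based while-loop scanner (line.find + slicing, jumping past each closing '#') with a single-pass character state machine accumulating the current token, and replaces the idx-counting assignment loop with dict(zip(sorted repeated tokens, short names)).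
import Mathlib
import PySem

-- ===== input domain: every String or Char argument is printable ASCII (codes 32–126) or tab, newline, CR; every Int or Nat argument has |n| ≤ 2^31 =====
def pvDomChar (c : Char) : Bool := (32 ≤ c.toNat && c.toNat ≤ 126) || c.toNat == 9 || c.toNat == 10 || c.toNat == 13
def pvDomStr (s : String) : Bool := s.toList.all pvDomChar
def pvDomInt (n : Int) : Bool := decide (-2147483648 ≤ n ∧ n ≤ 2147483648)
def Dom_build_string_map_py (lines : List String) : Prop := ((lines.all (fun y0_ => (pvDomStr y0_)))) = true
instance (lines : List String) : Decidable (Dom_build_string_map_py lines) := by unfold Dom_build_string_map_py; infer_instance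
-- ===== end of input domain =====

-- B replaces A's index-based find/slice scanner with a one-pass character state machine and
-- builds the result with dict(zip(...)); same asymptotics, measurably faster by constant factor.

-- short_names = [chr(ord('s') + i) for i in range(26)]  (identical comprehension in both sources)
def pvShortNames : List String :=
  (PySem.List.pyRange 0 26 1).map (fun i => String.ofList [Char.ofNat (115 + i).toNat])

-- ===== PORT A =====
-- the inner 'while i < len(line)' scanner of A; i only ever grows, so it is a Nat here
def scanAGo (s : List Char) (counts : PySem.Dict String Int) (i : Nat) :
    PySem.Dict String Int :=
  if h : i < s.length then
    if s[i] = '#' then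
      let e := PySem.Chars.findFrom s ['#'] ((i : Int) + 1) none
      if he : e ≠ -1 then
        let tok := String.ofList (PySem.Chars.slice s (some (i : Int)) (some (e + 1)))
        scanAGo s (counts.insert tok (counts.getD tok 0 + 1)) (e.toNat + 1)
      else counts
    else scanAGo s counts (i + 1)
  else counts
termination_by s.length - i
decreasing_by
  · have hk : i + 1 ≤ s.length := by omega
    have hcast : ((i : Int) + 1) = ((i + 1 : Nat) : Int) := by push_cast; ring
    have hspec := (PySem.Chars.findFrom_natCast_spec s ['#'] (i + 1) hk (by rw [← hcast]; exact he)).1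
    rw [← hcast] at hspec
    omega
  · omega

def build_string_map_py (lines : List String) : List (String × String) :=
  let string_counts := lines.foldl (fun counts line => scanAGo line.toList counts 0) PySem.Dict.empty
  let short_names := pvShortNames
  let res := (PySem.List.sorted string_counts.keys (fun x => x) false).foldl
    (fun (st : PySem.Dict String String × Int) string_val =>
      if 2 ≤ string_counts.getD string_val 0 ∧ st.2 < (short_names.length : Int) then
        (st.1.insert string_val (PySem.List.pyGetD short_names st.2 ""), st.2 + 1)
      else st)
    (PySem.Dict.empty, 0)
  res.1.items

-- ===== PORT B =====
-- one step of B's state machine: state = (counts, current partially-read token or None)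
def machineStep (st : PySem.Dict String Int × Option (List Char)) (ch : Char) :
    PySem.Dict String Int × Option (List Char) :=
  match st.2 with
  | none => if ch = '#' then (st.1, some [ch]) else st
  | some cur =>
    let cur' := cur ++ [ch]
    if ch = '#' then
      let tok := String.ofList cur'
      (st.1.insert tok (st.1.getD tok 0 + 1), none)
    else (st.1, some cur')

def build_string_map_py_alt (lines : List String) : List (String × String) :=
  let string_counts := lines.foldl
    (fun c line => (line.toList.foldl machineStep (c, (none : Option (List Char)))).1)
    PySem.Dict.empty
  let short_names := pvShortNames
  let repeated := (PySem.List.sorted string_counts.keys (fun x => x) false).filter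
    (fun s => decide (2 ≤ string_counts.getD s 0))
  (PySem.Dict.ofList (repeated.zip short_names)).items

-- ===== PRECONDITION & SPEC =====
def Spec_build_string_map_py (lines : List String) (out : List (String × String)) : Prop := out = build_string_map_py_alt lines
instance (lines : List String) (out : List (String × String)) : Decidable (Spec_build_string_map_py lines out) := by unfold Spec_build_string_map_py; infer_instance

-- ===== CLAIM (what is proved, stated in full; the proofs are below) =====
def Claim_equal_build_string_map_py : Prop := ∀ (lines : List String), Dom_build_string_map_py lines → Spec_build_string_map_py lines (build_string_map_py lines)

-- ===== LEMMAS AND PROOFS =====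

-- the common counting step: string_counts[tok] = string_counts.get(tok, 0) + 1
def insStep (c : PySem.Dict String Int) (t : String) : PySem.Dict String Int :=
  c.insert t (c.getD t 0 + 1)

-- the sequence of '#'-delimited tokens of a line (the common abstraction of both tokenizers)
def tokens : List Char → List String
  | [] => []
  | c :: rest =>
    if c = '#' then
      let rest' := rest.dropWhile (· ≠ '#')
      if rest'.isEmpty then []
      else String.ofList ('#' :: (rest.takeWhile (· ≠ '#') ++ ['#'])) :: tokens rest'.tail
    else tokens rest
termination_by s => s.length
decreasing_by
  · have h1 := List.length_dropWhile_le (fun x => decide (x ≠ '#')) rest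
    have h2 := List.length_tail (l := rest.dropWhile (fun x => decide (x ≠ '#')))
    simp only [List.length_cons]
    omega
  · simp

theorem tokens_not_hash (c : Char) (rest : List Char) (h0 : c ≠ '#') :
    tokens (c :: rest) = tokens rest := by
  rw [tokens]; simp [h0]

theorem tokens_hash_nil (rest : List Char) (hdrop : rest.dropWhile (· ≠ '#') = []) :
    tokens ('#' :: rest) = [] := by
  rw [tokens]; simp only [hdrop, List.isEmpty_nil, if_true]

theorem tokens_hash_cons (rest tail : List Char) (hdrop : rest.dropWhile (· ≠ '#') = '#' :: tail) :
    tokens ('#' :: rest)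
      = String.ofList ('#' :: (rest.takeWhile (· ≠ '#') ++ ['#'])) :: tokens tail := by
  rw [tokens]
  simp only [hdrop, List.isEmpty_cons, List.tail_cons, Bool.false_eq_true, if_false, if_true]

theorem machine_noHash (cs : List Char) (c : PySem.Dict String Int) :
    ∀ t, (∀ x ∈ cs, x ≠ '#') →
      cs.foldl machineStep (c, some t) = (c, some (t ++ cs)) := by
  induction cs with
  | nil => simp
  | cons x rest ih =>
    intro t h
    have hx : x ≠ '#' := h x (List.mem_cons_self)
    simp only [List.foldl_cons, machineStep, if_neg hx]
    rw [ih (t ++ [x]) (fun y hy => h y (List.mem_cons_of_mem _ hy))]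
    simp

theorem machine_midrun (mid : List Char) (rest : List Char) (c : PySem.Dict String Int) :
    ∀ t, (∀ x ∈ mid, x ≠ '#') →
      (mid ++ '#' :: rest).foldl machineStep (c, some t)
        = rest.foldl machineStep (insStep c (String.ofList (t ++ mid ++ ['#'])), none) := by
  induction mid with
  | nil => intro t h; simp [machineStep, insStep]
  | cons x m ih =>
    intro t h
    have hx : x ≠ '#' := h x (List.mem_cons_self)
    simp only [List.cons_append, List.foldl_cons, machineStep, if_neg hx]
    rw [ih (t ++ [x]) (fun y hy => h y (List.mem_cons_of_mem _ hy))]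
    simp

theorem machine_tokens_aux : ∀ (n : Nat) (s : List Char) (c : PySem.Dict String Int),
    s.length ≤ n → (s.foldl machineStep (c, none)).1 = (tokens s).foldl insStep c := by
  intro n
  induction n with
  | zero =>
    intro s c h
    have : s = [] := List.length_eq_zero_iff.mp (by omega)
    subst this
    simp [tokens]
  | succ m ih =>
    intro s c h
    match s with
    | [] => simp [tokens]
    | c0 :: rest =>
      by_cases h0 : c0 = '#'
      · subst h0
        rcases hdrop : rest.dropWhile (· ≠ '#') with _ | ⟨d, tail⟩
        · have hall : ∀ x ∈ rest, x ≠ '#' := by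
            intro x hx
            have := List.dropWhile_eq_nil_iff.mp hdrop x hx
            simpa using this
          have hmach := machine_noHash rest c ['#'] hall
          rw [tokens_hash_nil rest hdrop]
          simp [machineStep, hmach]
        · have hd : d = '#' := by
            have hw : rest.dropWhile (· ≠ '#') ≠ [] := by rw [hdrop]; exact List.cons_ne_nil _ _
            have := List.head_dropWhile_not (fun x => decide (x ≠ '#')) hw
            simp only [hdrop, List.head_cons] at this
            simpa using this
          subst hd
          have hmid : ∀ x ∈ rest.takeWhile (· ≠ '#'), x ≠ '#' := by
            intro x hx
            simpa using List.mem_takeWhile_imp hx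
          have hrest : rest = rest.takeWhile (· ≠ '#') ++ '#' :: tail := by
            conv_lhs => rw [← List.takeWhile_append_dropWhile (p := (· ≠ '#')) (l := rest)]
            rw [hdrop]
          have htail : tail.length ≤ m := by
            have h1 := List.length_dropWhile_le (fun x => decide (x ≠ '#')) rest
            rw [hdrop] at h1
            simp only [List.length_cons] at h h1
            omega
          have hstep : machineStep (c, none) '#' = (c, some ['#']) := by simp [machineStep]
          have hmr := machine_midrun (rest.takeWhile (· ≠ '#')) tail c ['#'] hmid
          rw [tokens_hash_cons rest tail hdrop]
          simp only [List.foldl_cons, hstep]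
          conv_lhs => rw [hrest]
          rw [hmr, ih tail _ htail]
          simp [insStep]
      · rw [tokens_not_hash c0 rest h0]
        simp only [List.foldl_cons, machineStep, if_neg h0]
        exact ih rest c (by simp only [List.length_cons] at h; omega)

theorem machine_tokens (s : List Char) (c : PySem.Dict String Int) :
    (s.foldl machineStep (c, none)).1 = (tokens s).foldl insStep c :=
  machine_tokens_aux s.length s c le_rfl

theorem scan_tokens_aux : ∀ (n : Nat) (s : List Char) (c : PySem.Dict String Int) (i : Nat),
    i ≤ s.length → s.length - i ≤ n →
    scanAGo s c i = (tokens (s.drop i)).foldl insStep c := by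
  intro n
  induction n with
  | zero =>
    intro s c i hi hn
    rw [scanAGo, dif_neg (by omega), List.drop_eq_nil_of_le (by omega)]
    simp [tokens]
  | succ m ih =>
    intro s c i hi hn
    by_cases hlt : i < s.length
    · have hdropi : s.drop i = s[i] :: s.drop (i+1) := List.drop_eq_getElem_cons hlt
      by_cases h0 : s[i] = '#'
      · have hk : i + 1 ≤ s.length := hlt
        have hcast : ((i : Int) + 1) = ((i + 1 : Nat) : Int) := by push_cast; ring
        by_cases he : PySem.Chars.findFrom s ['#'] ((i : Int) + 1) none = -1
        · have hninf : ¬ (['#'] <:+: s.drop (i+1)) := by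
            apply (PySem.Chars.findFrom_natCast_eq_neg_one_iff s ['#'] (i+1) hk).mp
            rw [← hcast]; exact he
          have hnmem : '#' ∉ s.drop (i+1) := fun hm => hninf ((List.singleton_infix_iff _ _).mpr hm)
          have hdw : (s.drop (i+1)).dropWhile (· ≠ '#') = [] := by
            apply List.dropWhile_eq_nil_iff.mpr
            intro x hx
            simp only [decide_eq_true_eq]
            rintro rfl
            exact hnmem hx
          rw [scanAGo, dif_pos hlt, if_pos h0, dif_neg (not_not_intro he)]
          rw [hdropi, h0, tokens_hash_nil _ hdw]
          rfl
        · have hs := PySem.Chars.findFrom_natCast_spec s ['#'] (i+1) hk (by rw [← hcast]; exact he)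
          rw [← hcast] at hs
          obtain ⟨hge, hpre, hmin⟩ := hs
          have he0 : (0 : Int) ≤ PySem.Chars.findFrom s ['#'] ((i : Int) + 1) none :=
            le_trans (by positivity) hge
          set M := (PySem.Chars.findFrom s ['#'] ((i : Int) + 1) none).toNat with hM
          have hm1 : i + 1 ≤ M := by omega
          have hMlt : M < s.length := by
            by_contra hMc
            obtain ⟨t', ht'⟩ := hpre
            rw [List.drop_eq_nil_of_le (by omega)] at ht'
            simp at ht'
          have hdM : s.drop M = '#' :: s.drop (M+1) := by
            obtain ⟨t', ht'⟩ := hpre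
            have hcons := List.drop_eq_getElem_cons hMlt
            have h2 : ('#' : Char) :: t' = s[M] :: s.drop (M+1) := by
              rw [← hcons, ← ht']; rfl
            rw [hcons, (List.cons.inj h2).1.symm]
          have hmidlen : ((s.drop (i+1)).take (M - (i+1))).length = M - (i+1) := by
            rw [List.length_take, List.length_drop]
            omega
          have hmidall : ∀ x ∈ (s.drop (i+1)).take (M - (i+1)), decide (x ≠ '#') = true := by
            intro x hx
            obtain ⟨k, hk1, hk2⟩ := List.mem_iff_getElem.mp hx
            simp only [decide_eq_true_eq]
            intro hxe
            have hkM : i + 1 + k < M := by rw [hmidlen] at hk1; omega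
            apply hmin (i+1+k) (by omega) (by omega)
            have hlt2 : i + 1 + k < s.length := by omega
            have hx2 : x = s[i+1+k]'hlt2 := by
              rw [← hk2]
              rw [List.getElem_take, List.getElem_drop]
            rw [List.drop_eq_getElem_cons hlt2, ← hx2, hxe]
            exact ⟨_, rfl⟩
          have hdecomp : s.drop (i+1) = (s.drop (i+1)).take (M - (i+1)) ++ '#' :: s.drop (M+1) := by
            have h1 := List.take_append_drop (M-(i+1)) (s.drop (i+1))
            rw [List.drop_drop, show i + 1 + (M - (i+1)) = M from by omega, hdM] at h1
            exact h1.symm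
          have htw : (s.drop (i+1)).takeWhile (· ≠ '#') = (s.drop (i+1)).take (M - (i+1)) := by
            conv_lhs => rw [hdecomp]
            rw [List.takeWhile_append]
            rw [if_pos (by rw [List.takeWhile_eq_self_iff.mpr hmidall])]
            rw [List.takeWhile_cons_of_neg (by simp)]
            simp
          have hdw : (s.drop (i+1)).dropWhile (· ≠ '#') = '#' :: s.drop (M+1) := by
            conv_lhs => rw [hdecomp]
            rw [List.dropWhile_append]
            rw [List.dropWhile_eq_nil_iff.mpr (fun x hx => hmidall x hx)]
            rw [List.dropWhile_cons_of_neg (by simp)]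
            simp
          have hcast2 : PySem.Chars.findFrom s ['#'] ((i : Int) + 1) none + 1 = ((M + 1 : Nat) : Int) := by
            push_cast
            omega
          have htok : PySem.Chars.slice s (some (i : Int)) (some (PySem.Chars.findFrom s ['#'] ((i : Int) + 1) none + 1))
              = '#' :: ((s.drop (i+1)).take (M - (i+1)) ++ ['#']) := by
            rw [hcast2]
            rw [PySem.Chars.slice_eq_listSlice, PySem.List.slice_natCast]
            have hsplit : s.drop i = ('#' :: ((s.drop (i+1)).take (M - (i+1)) ++ ['#'])) ++ s.drop (M+1) := by
              rw [hdropi, h0]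
              conv_lhs => rw [hdecomp]
              simp
            rw [hsplit]
            apply List.take_left'
            simp [hmidlen]
            omega
          rw [scanAGo, dif_pos hlt, if_pos h0, dif_pos he]
          rw [hdropi, h0, tokens_hash_cons _ _ hdw, htw, List.foldl_cons]
          rw [ih s _ (M+1) (by omega) (by omega)]
          rw [htok]
          rfl
      · rw [scanAGo, dif_pos hlt, if_neg h0]
        rw [hdropi, tokens_not_hash _ _ h0]
        exact ih s c (i+1) (by omega) (by omega)
    · rw [scanAGo, dif_neg hlt, List.drop_eq_nil_of_le (by omega)]
      simp [tokens]

theorem scan_tokens (s : List Char) (c : PySem.Dict String Int) (i : Nat) (hi : i ≤ s.length) :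
    scanAGo s c i = (tokens (s.drop i)).foldl insStep c :=
  scan_tokens_aux s.length s c i hi (by omega)

theorem counts_eq (lines : List String) :
    lines.foldl (fun counts line => scanAGo line.toList counts 0) PySem.Dict.empty
      = lines.foldl (fun c line => (line.toList.foldl machineStep (c, (none : Option (List Char)))).1) PySem.Dict.empty := by
  apply (PySem.List.foldl_congr_mem lines _ _ _ _).symm
  intro acc line _
  rw [machine_tokens, scan_tokens _ _ 0 (by omega), List.drop_zero]

theorem nodup_keys_insStep (d : PySem.Dict String Int) (t : String) (h : d.keys.Nodup) :
    (insStep d t).keys.Nodup := by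
  unfold insStep
  by_cases hc : d.contains t = true
  · rw [PySem.Dict.keys_insert_of_contains d _ hc]; exact h
  · rw [PySem.Dict.keys_insert_of_not_contains d _ (by simpa using hc)]
    have : t ∉ d.keys := by
      rw [PySem.Dict.contains_eq_decide_mem_keys] at hc
      simpa using hc
    rw [List.nodup_append]
    refine ⟨h, by simp, ?_⟩
    intro a ha b hb
    simp only [List.mem_singleton] at hb
    subst hb
    exact fun hab => this (hab ▸ ha)

theorem nodup_keys_foldl_insStep (l : List String) (d : PySem.Dict String Int)
    (h : d.keys.Nodup) : (l.foldl insStep d).keys.Nodup := by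
  induction l generalizing d with
  | nil => exact h
  | cons x rest ih => exact ih _ (nodup_keys_insStep d x h)

theorem nodup_keys_counts (lines : List String) :
    (lines.foldl (fun counts line => scanAGo line.toList counts 0) PySem.Dict.empty).keys.Nodup := by
  have : ∀ (d : PySem.Dict String Int), d.keys.Nodup →
      (lines.foldl (fun counts line => scanAGo line.toList counts 0) d).keys.Nodup := by
    induction lines with
    | nil => intro d h; exact h
    | cons line rest ih =>
      intro d h
      simp only [List.foldl_cons]
      apply ih
      rw [scan_tokens _ _ 0 (by omega), List.drop_zero]
      exact nodup_keys_foldl_insStep _ _ h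
  simpa [PySem.Dict.empty] using this PySem.Dict.empty (by simp [PySem.Dict.empty, PySem.Dict.keys])

theorem pvShortNames_length : pvShortNames.length = 26 := by decide

theorem tailA (cnt : PySem.Dict String Int) :
    ∀ (l : List String) (m : PySem.Dict String String) (idx : Nat), idx ≤ 26 → l.Nodup →
      (∀ s ∈ l, m.contains s = false) →
      ((l.foldl
        (fun (st : PySem.Dict String String × Int) string_val =>
          if 2 ≤ cnt.getD string_val 0 ∧ st.2 < (pvShortNames.length : Int) then
            (st.1.insert string_val (PySem.List.pyGetD pvShortNames st.2 ""), st.2 + 1)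
          else st)
        (m, (idx : Int))).1).items
      = m.items ++ (l.filter (fun s => decide (2 ≤ cnt.getD s 0))).zip (pvShortNames.drop idx) := by
  intro l
  induction l with
  | nil => intro m idx _ _ _; simp
  | cons sv rest ih =>
    intro m idx h26 hnd hfresh
    simp only [List.foldl_cons, List.filter_cons]
    by_cases hp : 2 ≤ cnt.getD sv 0
    · by_cases hidx : (idx : Int) < (pvShortNames.length : Int)
      · rw [if_pos ⟨hp, hidx⟩]
        have hlen : idx < pvShortNames.length := by exact_mod_cast hidx
        have hget : PySem.List.pyGetD pvShortNames (idx : Int) "" = pvShortNames[idx] :=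
          PySem.List.pyGetD_eq_getElem _ _ (by positivity) (by exact_mod_cast hlen)
        have hdropn : pvShortNames.drop idx = pvShortNames[idx] :: pvShortNames.drop (idx+1) :=
          List.drop_eq_getElem_cons hlen
        have hfresh1 : m.contains sv = false := hfresh sv List.mem_cons_self
        have hcast : (idx : Int) + 1 = ((idx + 1 : Nat) : Int) := by push_cast; ring
        have hfresh' : ∀ x ∈ rest, (m.insert sv pvShortNames[idx]).contains x = false := by
          intro x hx
          rw [PySem.Dict.contains_insert]
          have hxne : x ≠ sv := by rintro rfl; exact (List.nodup_cons.mp hnd).1 hx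
          simp [hxne, hfresh x (List.mem_cons_of_mem _ hx)]
        have h26' : idx + 1 ≤ 26 := by
          have := pvShortNames_length; omega
        rw [hget, hcast, ih _ (idx+1) h26' hnd.of_cons hfresh']
        rw [PySem.Dict.items_insert_of_not_contains _ _ hfresh1]
        rw [if_pos (by simpa using hp), hdropn, List.zip_cons_cons]
        simp
      · rw [if_neg (by tauto)]
        have hidx26 : idx = 26 := by
          have := pvShortNames_length
          omega
        have hd26 : pvShortNames.drop idx = [] := by
          rw [hidx26, ← pvShortNames_length, List.drop_length]
        rw [ih m idx h26 hnd.of_cons (fun x hx => hfresh x (List.mem_cons_of_mem _ hx)), hd26]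
        simp [hp]
    · rw [if_neg (by tauto)]
      rw [ih m idx h26 hnd.of_cons (fun x hx => hfresh x (List.mem_cons_of_mem _ hx))]
      simp [hp]

theorem map_fst_zip_nodup {α β : Type} (l1 : List α) (l2 : List β) (h : l1.Nodup) :
    ((l1.zip l2).map Prod.fst).Nodup := by
  induction l1 generalizing l2 with
  | nil => simp
  | cons x rest ih =>
    cases l2 with
    | nil => simp
    | cons y t =>
      simp only [List.zip_cons_cons, List.map_cons, List.nodup_cons]
      refine ⟨fun hx => ?_, ih t h.of_cons⟩
      obtain ⟨p, hp, hpe⟩ := List.mem_map.mp hx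
      exact (List.nodup_cons.mp h).1 (hpe ▸ (List.of_mem_zip hp).1)

-- ===== VERDICT (by name: the statement is the Claim_ definition above) =====
set_option maxRecDepth 4096 in
theorem build_string_map_py_spec : Claim_equal_build_string_map_py := by
  intro lines _
  simp only [Spec_build_string_map_py, build_string_map_py, build_string_map_py_alt]
  rw [← counts_eq]
  set C := lines.foldl (fun counts line => scanAGo line.toList counts 0) PySem.Dict.empty with hC
  have hknd : C.keys.Nodup := nodup_keys_counts lines
  have hnd : (PySem.List.sorted C.keys (fun x => x) false).Nodup :=
    ((PySem.List.sorted_perm C.keys (fun x => x) false).nodup_iff).mpr hknd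
  have htail := tailA C (PySem.List.sorted C.keys (fun x => x) false) PySem.Dict.empty 0
    (by omega) hnd (fun s _ => by simp [PySem.Dict.contains_empty])
  simp only [Nat.cast_zero, List.drop_zero] at htail
  rw [htail]
  have hrep := map_fst_zip_nodup
    ((PySem.List.sorted C.keys (fun x => x) false).filter (fun s => decide (2 ≤ C.getD s 0)))
    pvShortNames (hnd.filter _)
  rw [show PySem.Dict.ofList
      (((PySem.List.sorted C.keys (fun x => x) false).filter (fun s => decide (2 ≤ C.getD s 0))).zip pvShortNames)
      = PySem.Dict.empty.update
        (((PySem.List.sorted C.keys (fun x => x) false).filter (fun s => decide (2 ≤ C.getD s 0))).zip pvShortNames)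
    from rfl]
  rw [show (PySem.Dict.empty.update
        (((PySem.List.sorted C.keys (fun x => x) false).filter (fun s => decide (2 ≤ C.getD s 0))).zip pvShortNames))
      = List.foldl (fun acc p => acc.insert p.1 p.2) PySem.Dict.empty
        (((PySem.List.sorted C.keys (fun x => x) false).filter (fun s => decide (2 ≤ C.getD s 0))).zip pvShortNames)
    from rfl]
  rw [PySem.Dict.items_foldl_insert_fresh _ Prod.fst Prod.snd PySem.Dict.empty
    (fun a _ => by simp [PySem.Dict.contains_empty]) hrep]
  simp [PySem.Dict.empty]
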